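-- pv_equiv track=rewrite | github.com/drewstone/dynamic-governance | gov.py | hash_cap_selection
-- ===== SOURCE A (Python) =====
-- def hash_cap_selection(reports, hashes):
--     max_cap = 0
--     max_obj = 0
--     for i in range(len(reports)):
--         capacity = reports[i]
--         summed_hashpower = 0
--         summed_hashpower = sum([
--             hashes[j] for j in range(len(reports)) if reports[j] >= capacity
--         ])
--
--         if summed_hashpower * capacity > max_obj:
--             max_cap = capacity
--             max_obj = summed_hashpower * capacity
--
--     return max_cap, None
-- ===== SOURCE B (Python) =====
-- def hash_cap_selection(reports, hashes):
--     # Sort (report, hash) pairs by report descending; a running prefix sum then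
--     # gives, for each capacity value, the total hashpower of reports >= it.
--     pairs = sorted(zip(reports, hashes), key=lambda p: p[0], reverse=True)
--     power = {}
--     total = 0
--     for r, h in pairs:
--         total += h
--         power[r] = total
--     best_cap = 0
--     best_obj = 0
--     for c in reports:
--         obj = power[c] * c
--         if obj > best_obj:
--             best_cap = c
--             best_obj = obj
--     return best_cap, None
-- ===== Notes on version B (the rewrite author's own statement) =====
-- stated objective: faster
-- what changed: Replaced the quadratic rescan (for every report, re-sum all qualifying hashes) by one descending sort with a running suffix sum stored in a dict, then a single linear scan in original order.
import Mathlib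
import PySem

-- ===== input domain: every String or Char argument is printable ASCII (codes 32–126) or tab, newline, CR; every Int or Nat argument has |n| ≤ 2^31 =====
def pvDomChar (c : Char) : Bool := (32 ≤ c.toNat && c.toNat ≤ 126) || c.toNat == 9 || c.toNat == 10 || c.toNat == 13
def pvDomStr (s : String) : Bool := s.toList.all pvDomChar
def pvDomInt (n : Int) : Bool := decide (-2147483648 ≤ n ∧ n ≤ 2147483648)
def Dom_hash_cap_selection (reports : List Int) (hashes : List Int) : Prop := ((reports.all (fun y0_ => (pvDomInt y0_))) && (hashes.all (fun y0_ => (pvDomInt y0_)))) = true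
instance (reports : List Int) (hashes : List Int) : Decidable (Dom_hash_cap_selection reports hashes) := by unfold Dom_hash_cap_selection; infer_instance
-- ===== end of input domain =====

-- B replaces A's quadratic per-report rescan by one descending sort + running suffix sum
-- in a dict, then a single scan (faster in a timing run; return value only, no mutation).

-- ===== PORT A =====
def hash_cap_selection (reports : List Int) (hashes : List Int) : Int × Option Int :=
  let st := (PySem.List.pyRange 0 (reports.length : Int) 1).foldl
    (fun (s : Int × Int) i =>
      let capacity := PySem.List.pyGetD reports i 0
      let summed := (((PySem.List.pyRange 0 (reports.length : Int) 1).filter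
          (fun j => decide (PySem.List.pyGetD reports j 0 ≥ capacity))).map
          (fun j => PySem.List.pyGetD hashes j 0)).sum
      if summed * capacity > s.2 then (capacity, summed * capacity) else s)
    (0, 0)
  (st.1, none)

-- ===== PORT B =====
def hash_cap_selection_alt (reports : List Int) (hashes : List Int) : Int × Option Int :=
  let pairs := PySem.List.sorted (reports.zip hashes) (fun p => p.1) true
  -- total/power loop: state (total, dict)
  let st := pairs.foldl
    (fun (s : Int × PySem.Dict Int Int) p => (s.1 + p.2, s.2.insert p.1 (s.1 + p.2)))
    (0, PySem.Dict.empty)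
  let power := st.2
  -- power[c]: getD is exact here since under Pre_ every report occurs as a key
  let best := reports.foldl
    (fun (b : Int × Int) c =>
      let obj := power.getD c 0 * c
      if obj > b.2 then (c, obj) else b)
    (0, 0)
  (best.1, none)

-- ===== PRECONDITION & SPEC =====
-- A raises IndexError (hashes[j]) exactly when reports is longer than hashes.
def Pre_hash_cap_selection (reports : List Int) (hashes : List Int) : Prop :=
  reports.length ≤ hashes.length
instance (reports : List Int) (hashes : List Int) : Decidable (Pre_hash_cap_selection reports hashes) := by unfold Pre_hash_cap_selection; infer_instance
def pvWitness_hash_cap_selection : List Int × List Int := ([3, 1, 2], [4, 5, 6])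
def Spec_hash_cap_selection (reports : List Int) (hashes : List Int) (out : Int × Option Int) : Prop := out = hash_cap_selection_alt reports hashes
instance (reports : List Int) (hashes : List Int) (out : Int × Option Int) : Decidable (Spec_hash_cap_selection reports hashes out) := by unfold Spec_hash_cap_selection; infer_instance

-- ===== CLAIM (what is proved, stated in full; the proofs are below) =====
def Claim_equal_hash_cap_selection : Prop := ∀ (reports : List Int) (hashes : List Int), Dom_hash_cap_selection reports hashes → Pre_hash_cap_selection reports hashes → Spec_hash_cap_selection reports hashes (hash_cap_selection reports hashes)

-- ===== LEMMAS AND PROOFS =====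

-- Total hashpower of pairs whose report is ≥ c.
def pvS (ps : List (Int × Int)) (c : Int) : Int :=
  ((ps.filter (fun p => decide (p.1 ≥ c))).map (fun p => p.2)).sum

theorem pvS_perm {ps qs : List (Int × Int)} (h : ps.Perm qs) (c : Int) :
    pvS ps c = pvS qs c := by
  unfold pvS
  exact ((h.filter _).map _).sum_eq

theorem pvS_zero (ps : List (Int × Int)) (c : Int)
    (h : ∀ p ∈ ps, ¬ (p.1 ≥ c)) : pvS ps c = 0 := by
  unfold pvS
  rw [List.filter_eq_nil_iff.mpr (by simpa using h)]
  rfl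

-- A's inner comprehension equals pvS of the zip (indices stay in range under Pre_).
theorem pvA_aux : ∀ (rs hs : List Int), rs.length ≤ hs.length → ∀ (c : Int),
    (((List.range rs.length).filter (fun k => decide (rs.getD k 0 ≥ c))).map
        (fun k => hs.getD k 0)).sum = pvS (rs.zip hs) c := by
  intro rs
  induction rs with
  | nil => intro hs _ c; simp [pvS]
  | cons r rt ih =>
    intro hs hlen c
    cases hs with
    | nil => simp at hlen
    | cons h ht =>
      have hlen' : rt.length ≤ ht.length := by simpa using hlen
      have ih' := ih ht hlen' c
      by_cases hc : r ≥ c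
      · simp [List.range_succ_eq_map, List.filter_map,
          Function.comp_def, hc, pvS, List.map_map] at *
        exact ih'
      · simp [List.range_succ_eq_map, List.filter_map,
          Function.comp_def, hc, pvS, List.map_map] at *
        exact ih'

theorem pvA_sum (rs hs : List Int) (c : Int) (hlen : rs.length ≤ hs.length) :
    (((PySem.List.pyRange 0 (rs.length : Int) 1).filter
        (fun j => decide (PySem.List.pyGetD rs j 0 ≥ c))).map
        (fun j => PySem.List.pyGetD hs j 0)).sum = pvS (rs.zip hs) c := by
  rw [PySem.List.pyRange_zero_natCast, List.filter_map, List.map_map]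
  simp only [Function.comp_def, PySem.List.pyGetD_natCast]
  exact pvA_aux rs hs hlen c

-- The descending fold builds the dict of suffix sums.
theorem pvDict_fold (l : List (Int × Int))
    (hp : l.Pairwise (fun a b => b.1 ≤ a.1)) :
    ∀ (t : Int) (d : PySem.Dict Int Int) (c : Int),
    ((l.foldl (fun (s : Int × PySem.Dict Int Int) p =>
        (s.1 + p.2, s.2.insert p.1 (s.1 + p.2))) (t, d)).2).getD c 0
      = if c ∈ l.map (fun p => p.1) then t + pvS l c else d.getD c 0 := by
  induction l with
  | nil => intro t d c; simp
  | cons p rest ih =>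
    intro t d c
    have hhead : ∀ q ∈ rest, q.1 ≤ p.1 := (List.pairwise_cons.mp hp).1
    have hrest := ih (List.pairwise_cons.mp hp).2 (t + p.2) (d.insert p.1 (t + p.2)) c
    simp only [List.foldl_cons]
    rw [hrest]
    by_cases hmem : c ∈ rest.map (fun p => p.1)
    · have hcp : p.1 ≥ c := by
        obtain ⟨q, hq, hqc⟩ := List.mem_map.mp hmem
        exact hqc ▸ hhead q hq
      have hS : pvS (p :: rest) c = p.2 + pvS rest c := by
        simp [pvS, hcp]
      have hmem' : c ∈ (p :: rest).map (fun p => p.1) := by simp [hmem]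
      rw [if_pos hmem, if_pos hmem', hS]; ring
    · by_cases hcp : c = p.1
      · rw [if_neg hmem, hcp]
        have h0 : pvS rest p.1 = 0 :=
          pvS_zero rest p.1 (fun q hq hge =>
            (hcp ▸ hmem) (List.mem_map.mpr ⟨q, hq, le_antisymm (hhead q hq) hge⟩))
        have hS : pvS (p :: rest) p.1 = p.2 + pvS rest p.1 := by
          simp [pvS]
        simp [PySem.Dict.getD_insert_self, hS, h0]
      · rw [if_neg hmem, PySem.Dict.getD_insert_of_ne _ _ _ hcp]
        have hmem' : c ∉ (p :: rest).map (fun p => p.1) := by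
          simp only [List.map_cons, List.mem_cons, not_or]; exact ⟨hcp, hmem⟩
        rw [if_neg hmem']

-- ===== VERDICT (by name: the statement is the Claim_ definition above) =====
theorem hash_cap_selection_spec : Claim_equal_hash_cap_selection := by
  intro reports hashes _ hpre
  unfold Spec_hash_cap_selection
  have hlen : reports.length ≤ hashes.length := hpre
  have hrange := PySem.List.foldl_pyRange_zero_pyGetD' reports 0
    (fun (s : Int × Int) capacity =>
      let summed := (((PySem.List.pyRange 0 (reports.length : Int) 1).filter
          (fun j => decide (PySem.List.pyGetD reports j 0 ≥ capacity))).map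
          (fun j => PySem.List.pyGetD hashes j 0)).sum
      if summed * capacity > s.2 then (capacity, summed * capacity) else s) (0, 0)
  have hfold :
      List.foldl
        (fun (s : Int × Int) capacity =>
          let summed := (((PySem.List.pyRange 0 (reports.length : Int) 1).filter
              (fun j => decide (PySem.List.pyGetD reports j 0 ≥ capacity))).map
              (fun j => PySem.List.pyGetD hashes j 0)).sum
          if summed * capacity > s.2 then (capacity, summed * capacity) else s) (0, 0) reports
      = List.foldl
        (fun (b : Int × Int) c =>
          let obj := (((PySem.List.sorted (reports.zip hashes) (fun p => p.1) true).foldl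
              (fun (s : Int × PySem.Dict Int Int) p =>
                (s.1 + p.2, s.2.insert p.1 (s.1 + p.2)))
              (0, PySem.Dict.empty)).2).getD c 0 * c
          if obj > b.2 then (c, obj) else b) (0, 0) reports := by
    apply PySem.List.foldl_congr_mem
    intro acc c hc
    have hsorted := PySem.List.sorted_perm (reports.zip hashes) (fun p => p.1) true
    have hpair := PySem.List.sorted_pairwise_rev (reports.zip hashes) (fun p => p.1)
    have h1 : List.map (fun p : Int × Int => p.1) (reports.zip hashes) = reports :=
      List.map_fst_zip hlen
    have hmem : c ∈ (PySem.List.sorted (reports.zip hashes) (fun p => p.1) true).map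
        (fun p => p.1) := by
      rw [(hsorted.map (fun p : Int × Int => p.1)).mem_iff, h1]; exact hc
    have hB := pvDict_fold _ hpair 0 PySem.Dict.empty c
    rw [if_pos hmem, pvS_perm hsorted c, zero_add] at hB
    rw [pvA_sum reports hashes c hlen, hB]
  exact congrArg (fun x : Int × Int => (x.1, (none : Option Int))) (hrange.trans hfold)
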